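-- pv_equiv track=rewrite | github.com/kldtz/CharSplit | kirke/utils/osutils.py | _find_fname_with_lang
-- ===== SOURCE A (Python) =====
-- from typing import Any, DefaultDict, Dict, List, Optional, Set, Tuple
--
-- def _find_fname_with_lang(lang: str, lang_fname_list: List[Tuple[str, str]]) -> Optional[str]:
--     """Return the model file name that matches the language.
--
--     Returns None if not even EN is available.
--     """
--     en_fname = None
--     for xlang, fname in lang_fname_list:
--         if xlang == lang:
--             return fname
--         if xlang == 'en':
--             en_fname = fname
--     # return the EN if lang has no match;  None if EN not available
--     return en_fname
-- ===== SOURCE B (Python) =====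
-- from typing import List, Optional, Tuple
--
-- def _find_fname_with_lang(lang: str, lang_fname_list: List[Tuple[str, str]]) -> Optional[str]:
--     matches = [fname for xlang, fname in lang_fname_list if xlang == lang]
--     if matches:
--         return matches[0]
--     en_matches = [fname for xlang, fname in lang_fname_list if xlang == 'en']
--     return en_matches[-1] if en_matches else None
-- ===== Notes on version B (the rewrite author's own statement) =====
-- stated objective: idiomatic
-- what changed: Replaces A's single accumulator loop with two declarative filter passes: first match for the requested language, otherwise the last 'en' entry (A's accumulator keeps the last 'en' seen).
import Mathlib
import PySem

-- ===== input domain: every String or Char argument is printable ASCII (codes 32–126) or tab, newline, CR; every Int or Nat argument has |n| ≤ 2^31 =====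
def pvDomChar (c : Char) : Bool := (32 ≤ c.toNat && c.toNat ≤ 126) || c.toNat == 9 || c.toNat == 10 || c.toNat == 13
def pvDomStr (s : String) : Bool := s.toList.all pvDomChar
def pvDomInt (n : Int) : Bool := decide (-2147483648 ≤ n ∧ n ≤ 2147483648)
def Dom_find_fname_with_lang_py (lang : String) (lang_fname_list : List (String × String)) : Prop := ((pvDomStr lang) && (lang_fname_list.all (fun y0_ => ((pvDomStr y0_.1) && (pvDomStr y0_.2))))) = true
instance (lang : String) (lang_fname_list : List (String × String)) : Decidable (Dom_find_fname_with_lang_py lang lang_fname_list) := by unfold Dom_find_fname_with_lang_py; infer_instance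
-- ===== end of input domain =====

-- ===== PORT A =====
-- loop of A: 'en_fname' accumulator, early return on exact language match
def pvLoopA (lang : String) : List (String × String) → Option String → Option String
  | [], en_fname => en_fname
  | (xlang, fname) :: rest, en_fname =>
    if xlang == lang then some fname
    else if xlang == "en" then pvLoopA lang rest (some fname)
    else pvLoopA lang rest en_fname

def find_fname_with_lang_py (lang : String) (lang_fname_list : List (String × String)) : Option String :=
  pvLoopA lang lang_fname_list none

-- ===== PORT B =====
-- B: two filter passes; matches[0], else en_matches[-1], else None
def find_fname_with_lang_py_alt (lang : String) (lang_fname_list : List (String × String)) : Option String :=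
  let langMatches := (lang_fname_list.filter (fun p => p.1 == lang)).map Prod.snd
  match langMatches with
  | f :: _ => some f
  | [] =>
    let en_matches := (lang_fname_list.filter (fun p => p.1 == "en")).map Prod.snd
    en_matches.getLast?

-- ===== PRECONDITION & SPEC =====
def Spec_find_fname_with_lang_py (lang : String) (lang_fname_list : List (String × String)) (out : Option String) : Prop := out = find_fname_with_lang_py_alt lang lang_fname_list
instance (lang : String) (lang_fname_list : List (String × String)) (out : Option String) : Decidable (Spec_find_fname_with_lang_py lang lang_fname_list out) := by unfold Spec_find_fname_with_lang_py; infer_instance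

-- ===== CLAIM (what is proved, stated in full; the proofs are below) =====
def Claim_equal_find_fname_with_lang_py : Prop := ∀ (lang : String) (lang_fname_list : List (String × String)), Dom_find_fname_with_lang_py lang lang_fname_list → Spec_find_fname_with_lang_py lang lang_fname_list (find_fname_with_lang_py lang lang_fname_list)

-- ===== LEMMAS AND PROOFS =====

-- ===== VERDICT (by name: the statement is the Claim_ definition above) =====
lemma pvLoopA_eq (lang : String) : ∀ (l : List (String × String)) (en : Option String),
    pvLoopA lang l en =
      match (l.filter (fun p => p.1 == lang)).map Prod.snd with
      | f :: _ => some f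
      | [] => (((l.filter (fun p => p.1 == "en")).map Prod.snd).getLast?).or en := by
  intro l
  induction l with
  | nil => intro en; simp [pvLoopA]
  | cons hd rest ih =>
    intro en
    obtain ⟨x, f⟩ := hd
    by_cases hx : x == lang
    · simp [pvLoopA, hx]
    · by_cases he : x == "en"
      · simp only [pvLoopA, hx, he, List.filter_cons, Bool.false_eq_true, if_false, if_true]
        rw [ih]
        cases hm : (rest.filter (fun p => p.1 == lang)).map Prod.snd with
        | cons g _ => simp
        | nil =>
          simp only []
          cases hl : ((rest.filter (fun p => p.1 == "en")).map Prod.snd).getLast? with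
          | some g => simp [List.getLast?_cons, hl, Option.or]
          | none =>
            have : (rest.filter (fun p => p.1 == "en")).map Prod.snd = [] := by
              cases h : (rest.filter (fun p => p.1 == "en")).map Prod.snd with
              | nil => rfl
              | cons a t => rw [h] at hl; simp at hl
            simp [this]
      · simp [pvLoopA, hx, he, ih en]

theorem find_fname_with_lang_py_spec : Claim_equal_find_fname_with_lang_py := by
  intro lang l _
  unfold Spec_find_fname_with_lang_py find_fname_with_lang_py find_fname_with_lang_py_alt
  rw [pvLoopA_eq]
  cases (l.filter (fun p => p.1 == lang)).map Prod.snd <;> simp [Option.or_none]
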